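-- pv_equiv track=rewrite | github.com/JafarShamzsi/pygit | main.py | next_size_delta
-- ===== SOURCE A (Python) =====
-- def next_size_delta(bs):
--     """Parse a size value from delta encoding."""
--     size = bs[0] & 0b01111111
--     i = 1
--     shift = 7
--
--     # Parse variable-length size encoding
--     while bs[i-1] & 0b10000000:
--         size |= (bs[i] & 0b01111111) << shift
--         shift += 7
--         i += 1
--
--     return size, bs[i:]
-- ===== SOURCE B (Python) =====
-- def next_size_delta(bs):
--     """Parse a size value from delta encoding (two-pass: locate end, then rebuild)."""
--     # Pass 1: find the end index i (first byte with clear high bit is at i-1).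
--     i = 1
--     while bs[i - 1] & 0b10000000:
--         i += 1
--     # Pass 2: reconstruct the integer from the 7-bit chunks.
--     size = sum((bs[j] & 0b01111111) << (7 * j) for j in range(i))
--     return size, bs[i:]
-- ===== Notes on version B (the rewrite author's own statement) =====
-- stated objective: alternative
-- what changed: A fuses boundary detection and value accumulation into one while-loop that or-accumulates shifted chunks with running shift state; B first scans only to locate the end index, then reconstructs the value in a separate pass as a sum of shifted 7-bit chunks over range(i).
import Mathlib
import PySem

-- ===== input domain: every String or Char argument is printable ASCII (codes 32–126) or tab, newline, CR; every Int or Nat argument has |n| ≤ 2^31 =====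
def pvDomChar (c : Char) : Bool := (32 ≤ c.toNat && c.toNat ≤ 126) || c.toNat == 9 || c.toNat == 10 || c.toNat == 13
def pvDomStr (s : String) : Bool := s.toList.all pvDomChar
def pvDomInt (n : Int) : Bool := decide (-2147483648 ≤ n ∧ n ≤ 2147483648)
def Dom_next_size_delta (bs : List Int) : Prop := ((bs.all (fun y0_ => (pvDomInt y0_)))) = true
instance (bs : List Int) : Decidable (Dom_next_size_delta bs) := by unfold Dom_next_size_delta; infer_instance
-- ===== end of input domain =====

-- B replaces A's fused scan-and-accumulate loop by two passes: find the end index, then sum the shifted 7-bit chunks (objective: alternative decomposition, same cost).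

-- ===== PORT A =====
-- A's while-loop; fuel bounds the iterations (Python raises IndexError past the end,
-- which Pre_ excludes; the fuel-0/none branches return a junk value only there).
def nextA_loop (bs : List Int) (fuel : Nat) (size : Int) (i : Nat) (shift : Nat) : Int × List Int :=
  match fuel with
  | 0 => (0, [])
  | fuel+1 =>
    match PySem.List.pyGet? bs ((i : Int) - 1) with
    | none => (0, [])
    | some prev =>
      if PySem.Int.band prev 128 ≠ 0 then
        match PySem.List.pyGet? bs (i : Int) with
        | none => (0, [])
        | some b =>
          nextA_loop bs fuel (PySem.Int.bor size (PySem.Int.band b 127 <<< shift)) (i+1) (shift+7)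
      else (size, PySem.List.slice bs (some (i : Int)) none)

def next_size_delta (bs : List Int) : Int × List Int :=
  match PySem.List.pyGet? bs 0 with
  | none => (0, [])
  | some b0 => nextA_loop bs (bs.length + 1) (PySem.Int.band b0 127) 1 7

-- ===== PORT B =====
-- Pass 1 of Source B: the boundary-finding while-loop (fuel as above; junk default only outside Pre_).
def findEnd (bs : List Int) (fuel : Nat) (i : Nat) : Nat :=
  match fuel with
  | 0 => i
  | fuel+1 =>
    if PySem.Int.band (PySem.List.pyGetD bs ((i : Int) - 1) 0) 128 ≠ 0 then findEnd bs fuel (i+1) else i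

def next_size_delta_alt (bs : List Int) : Int × List Int :=
  let i := findEnd bs bs.length 1
  let size := ((PySem.List.pyRange 0 (i : Int) 1).map
      (fun j => PySem.Int.band (PySem.List.pyGetD bs j 0) 127 <<< (7 * j.toNat))).sum
  (size, PySem.List.slice bs (some (i : Int)) none)

-- ===== PRECONDITION & SPEC =====
-- Pre_ excludes exactly the inputs where A raises IndexError: lists (incl. []) in which
-- every byte has the continuation bit set, so the scan runs off the end.
def Pre_next_size_delta (bs : List Int) : Prop := ∃ b ∈ bs, PySem.Int.band b 128 = 0
instance (bs : List Int) : Decidable (Pre_next_size_delta bs) := by unfold Pre_next_size_delta; infer_instance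
def pvWitness_next_size_delta : List Int := ([3])
def Spec_next_size_delta (bs : List Int) (out : Int × List Int) : Prop := out = next_size_delta_alt bs
instance (bs : List Int) (out : Int × List Int) : Decidable (Spec_next_size_delta bs out) := by unfold Spec_next_size_delta; infer_instance

-- ===== CLAIM (what is proved, stated in full; the proofs are below) =====
def Claim_equal_next_size_delta : Prop := ∀ (bs : List Int), Dom_next_size_delta bs → Pre_next_size_delta bs → Spec_next_size_delta bs (next_size_delta bs)

-- ===== LEMMAS AND PROOFS =====

-- value of one 7-bit chunk
def pvChunk (x : Int) : Int := PySem.Int.band x 127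

-- Horner-form value of the m chunks starting at index j
def pvChunkSum (bs : List Int) (j m : Nat) : Int :=
  match m with
  | 0 => 0
  | Nat.succ m => pvChunk (bs.getD j 0) + 2^7 * pvChunkSum bs (j+1) m

theorem pv_lor_shl_eq_add (k : Nat) : ∀ a b : Nat, a < 2^k → a ||| (b <<< k) = a + b <<< k := by
  induction k with
  | zero =>
    intro a b h
    interval_cases a
    simp
  | succ k ih =>
    intro a b h
    have h2 : a / 2 < 2 ^ k := by
      have := Nat.pow_succ 2 k
      omega
    have hbit : a = Nat.bit (decide (a % 2 = 1)) (a / 2) := by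
      rcases Nat.mod_two_eq_zero_or_one a with hm | hm <;> simp [Nat.bit, hm] <;> omega
    calc a ||| (b <<< (k+1))
        = Nat.bit (decide (a % 2 = 1)) (a / 2) ||| Nat.bit false (b <<< k) := by
          rw [← hbit]; congr 1
          simp [Nat.bit, Nat.shiftLeft_eq, Nat.pow_succ]; ring
      _ = Nat.bit (decide (a % 2 = 1) || false) ((a / 2) ||| (b <<< k)) := Nat.lor_bit _ _ _ _
      _ = Nat.bit (decide (a % 2 = 1)) (a / 2 + b <<< k) := by rw [ih _ _ h2, Bool.or_false]
      _ = a + b <<< (k+1) := by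
          have hs : b <<< (k+1) = 2 * (b <<< k) := by
            simp [Nat.shiftLeft_eq, Nat.pow_succ]; ring
          rcases Nat.mod_two_eq_zero_or_one a with hm | hm <;> simp [Nat.bit, hm] <;> omega

theorem pv_bor_shl_eq_add (a b : Int) (k : Nat) (ha0 : 0 ≤ a) (ha : a < 2^k) (hb : 0 ≤ b) :
    PySem.Int.bor a (b <<< k) = a + b * 2^k := by
  have hbs : b <<< k = b * 2^k := Int.shiftLeft_eq b k
  have hnn : 0 ≤ b <<< k := by rw [hbs]; positivity
  rw [PySem.Int.bor_of_nonneg ha0 hnn]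
  have hc : ((2:Nat)^k : Int) = (2:Int)^k := by push_cast; ring
  have h1 : a.toNat < 2^k := by omega
  have h3 : (b <<< k).toNat = b.toNat <<< k := by
    have h4 : ((b <<< k).toNat : Int) = ((b.toNat <<< k : Nat) : Int) := by
      rw [Int.toNat_of_nonneg hnn, hbs]
      push_cast [Nat.shiftLeft_eq, Int.toNat_of_nonneg hb]
      ring
    exact_mod_cast h4
  rw [h3, pv_lor_shl_eq_add k _ _ h1]
  push_cast [Nat.shiftLeft_eq, Int.toNat_of_nonneg ha0, Int.toNat_of_nonneg hb]
  ring

theorem pv_band127_nonneg (x : Int) : 0 ≤ PySem.Int.band x 127 := by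
  simp only [PySem.Int.band]
  split_ifs <;> first | positivity | omega

theorem pv_band127_lt (x : Int) : PySem.Int.band x 127 < 128 := by
  simp only [PySem.Int.band]
  have h127 : ((127:Int)).toNat = 127 := rfl
  have hr := Nat.and_le_right (n := x.toNat) (m := (127:Int).toNat)
  have hl := Nat.and_le_left (n := (127:Int).toNat) (m := (-x - 1).toNat)
  split_ifs <;> omega

theorem nextA_loop_eq (bs : List Int) (e : Nat) (he : e < bs.length)
    (hclear : PySem.Int.band (bs.getD e 0) 128 = 0) :
    ∀ m k fuel size shift, k + m = e → m < fuel →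
    (∀ j, k ≤ j → j < e → PySem.Int.band (bs.getD j 0) 128 ≠ 0) →
    0 ≤ size → size < 2^shift →
    nextA_loop bs fuel size (k+1) shift = (size + pvChunkSum bs (k+1) m * 2^shift, bs.drop (e+1)) := by
  intro m
  induction m with
  | zero =>
    intro k fuel size shift hke hf h1 hs0 hs1
    have hek : e = k := by omega
    subst hek
    obtain ⟨fuel, rfl⟩ : ∃ f, fuel = f + 1 := ⟨fuel - 1, by omega⟩
    have hcl' : PySem.Int.band bs[e] 128 = 0 := by
      rw [← List.getD_eq_getElem bs 0 he]; exact hclear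
    have hget : PySem.List.pyGet? bs (((e+1 : Nat) : Int) - 1) = some (bs[e]) := by
      rw [show (((e+1 : Nat)) : Int) - 1 = ((e : Nat) : Int) from by push_cast; ring,
        PySem.List.pyGet?_natCast, List.getElem?_eq_getElem he]
    simp only [nextA_loop, hget]
    rw [if_neg (not_not_intro hcl')]
    rw [PySem.List.slice_from_natCast]
    simp [pvChunkSum]
  | succ m ih =>
    intro k fuel size shift hke hf h1 hs0 hs1
    obtain ⟨fuel, rfl⟩ : ∃ f, fuel = f + 1 := ⟨fuel - 1, by omega⟩
    have hk_lt : k < bs.length := by omega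
    have hk1_lt : k + 1 < bs.length := by omega
    have hidx : ((k+1 : Nat) : Int) - 1 = ((k : Nat) : Int) := by push_cast; ring
    have hget : PySem.List.pyGet? bs (((k+1 : Nat) : Int) - 1) = some (bs.getD k 0) := by
      rw [hidx, PySem.List.pyGet?_natCast, List.getElem?_eq_getElem hk_lt,
        List.getD_eq_getElem bs 0 hk_lt]
    have hget1 : PySem.List.pyGet? bs ((k+1 : Nat) : Int) = some (bs.getD (k+1) 0) := by
      rw [PySem.List.pyGet?_natCast, List.getElem?_eq_getElem hk1_lt,
        List.getD_eq_getElem bs 0 hk1_lt]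
    have hcond : PySem.Int.band (bs.getD k 0) 128 ≠ 0 := h1 k (le_refl k) (by omega)
    have hchunk0 : 0 ≤ pvChunk (bs.getD (k+1) 0) := pv_band127_nonneg _
    have hchunk1 : pvChunk (bs.getD (k+1) 0) < 128 := pv_band127_lt _
    have hbor : PySem.Int.bor size (PySem.Int.band (bs.getD (k+1) 0) 127 <<< shift)
        = size + pvChunk (bs.getD (k+1) 0) * 2^shift :=
      pv_bor_shl_eq_add size _ shift hs0 hs1 hchunk0
    have hs0' : 0 ≤ size + pvChunk (bs.getD (k+1) 0) * 2^shift := by positivity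
    have hs1' : size + pvChunk (bs.getD (k+1) 0) * 2^shift < 2^(shift+7) := by
      have hp : (0:Int) < 2^shift := by positivity
      have : (2:Int)^(shift+7) = 2^shift * 128 := by rw [pow_add]; norm_num
      nlinarith
    have := ih (k+1) fuel (size + pvChunk (bs.getD (k+1) 0) * 2^shift) (shift+7)
      (by omega) (by omega) (fun j hj1 hj2 => h1 j (by omega) hj2) hs0' hs1'
    simp only [nextA_loop, hget, hcond, ne_eq, not_false_eq_true, if_true, hget1, hbor]
    rw [this]
    congr 1
    simp only [pvChunkSum]
    rw [pow_add]
    ring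

theorem findEnd_eq (bs : List Int) (e : Nat) (_he : e < bs.length)
    (hclear : PySem.Int.band (bs.getD e 0) 128 = 0) :
    ∀ m k fuel, k + m = e → m < fuel →
    (∀ j, k ≤ j → j < e → PySem.Int.band (bs.getD j 0) 128 ≠ 0) →
    findEnd bs fuel (k+1) = e + 1 := by
  intro m
  induction m with
  | zero =>
    intro k fuel hke hf h1
    have hek : e = k := by omega
    subst hek
    obtain ⟨fuel, rfl⟩ : ∃ f, fuel = f + 1 := ⟨fuel - 1, by omega⟩
    have hget : PySem.List.pyGetD bs (((e+1 : Nat) : Int) - 1) 0 = bs.getD e 0 := by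
      rw [show (((e+1 : Nat)) : Int) - 1 = ((e : Nat) : Int) from by push_cast; ring,
        PySem.List.pyGetD_natCast]
    simp only [findEnd, hget]
    rw [if_neg (not_not_intro hclear)]
  | succ m ih =>
    intro k fuel hke hf h1
    obtain ⟨fuel, rfl⟩ : ∃ f, fuel = f + 1 := ⟨fuel - 1, by omega⟩
    have hidx : ((k+1 : Nat) : Int) - 1 = ((k : Nat) : Int) := by push_cast; ring
    have hget : PySem.List.pyGetD bs (((k+1 : Nat) : Int) - 1) 0 = bs.getD k 0 := by
      rw [hidx, PySem.List.pyGetD_natCast]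
    have hcond : PySem.Int.band (bs.getD k 0) 128 ≠ 0 := h1 k (le_refl k) (by omega)
    have := ih (k+1) fuel (by omega) (by omega) (fun j hj1 hj2 => h1 j (by omega) hj2)
    simp only [findEnd, hget, hcond, ne_eq, not_false_eq_true, if_true]
    exact this

theorem pvChunkSum_succ_right (bs : List Int) :
    ∀ m j, pvChunkSum bs j (m+1) = pvChunkSum bs j m + 2^(7*m) * pvChunk (bs.getD (j+m) 0) := by
  intro m
  induction m with
  | zero => intro j; simp [pvChunkSum]
  | succ m ih =>
    intro j
    have h1 : pvChunkSum bs j (m+2) = pvChunk (bs.getD j 0) + 2^7 * pvChunkSum bs (j+1) (m+1) := rfl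
    rw [h1, ih (j+1)]
    have h2 : pvChunkSum bs j (m+1) = pvChunk (bs.getD j 0) + 2^7 * pvChunkSum bs (j+1) m := rfl
    rw [h2, show 7*(m+1) = 7*m+7 by ring, pow_add, show j+1+m = j+(m+1) by ring]
    ring

theorem sumB_eq (bs : List Int) :
    ∀ m : Nat, ((PySem.List.pyRange 0 ((m : Nat) : Int) 1).map
      (fun j => PySem.Int.band (PySem.List.pyGetD bs j 0) 127 <<< (7 * j.toNat))).sum
      = pvChunkSum bs 0 m := by
  intro m
  induction m with
  | zero => simp [pvChunkSum, PySem.List.pyRange]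
  | succ m ih =>
    have hc : ((m+1 : Nat) : Int) = ((m : Nat) : Int) + 1 := by push_cast; ring
    rw [hc, PySem.List.pyRange_one_succ_right (by positivity), List.map_append, List.sum_append, ih]
    simp only [List.map_cons, List.map_nil, List.sum_cons, List.sum_nil, add_zero]
    rw [PySem.List.pyGetD_natCast, Int.toNat_natCast, Int.shiftLeft_eq,
      pvChunkSum_succ_right bs m 0]
    simp only [Nat.zero_add, pvChunk]
    ring

-- ===== VERDICT (by name: the statement is the Claim_ definition above) =====
theorem next_size_delta_spec : Claim_equal_next_size_delta := by
  intro bs _hDom hPre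
  unfold Spec_next_size_delta
  have hex : ∃ b ∈ bs, (PySem.Int.band b 128 == 0) = true := by
    obtain ⟨b, hb, h0⟩ := hPre
    exact ⟨b, hb, by simp [h0]⟩
  set p : Int → Bool := fun b => PySem.Int.band b 128 == 0 with hp
  set e : Nat := bs.findIdx p with hedef
  have he : e < bs.length := List.findIdx_lt_length.mpr hex
  have hclear : PySem.Int.band (bs.getD e 0) 128 = 0 := by
    have := List.findIdx_getElem (w := he)
    rw [List.getD_eq_getElem bs 0 he]
    simpa [hp] using this
  have h1 : ∀ j, 0 ≤ j → j < e → PySem.Int.band (bs.getD j 0) 128 ≠ 0 := by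
    intro j _ hj
    have hjl : j < bs.length := by omega
    have := List.not_of_lt_findIdx (p := p) (xs := bs) hj
    rw [List.getD_eq_getElem bs 0 hjl]
    simpa [hp] using this
  have hlen : 0 < bs.length := by omega
  have hb0 : PySem.List.pyGet? bs 0 = some (bs[0]'hlen) := by
    rw [PySem.List.pyGet?_zero, List.getElem?_eq_getElem hlen]
  have hA : next_size_delta bs = (pvChunkSum bs 0 (e+1), bs.drop (e+1)) := by
    unfold next_size_delta
    rw [hb0]
    show nextA_loop bs (bs.length + 1) (PySem.Int.band (bs[0]'hlen) 127) 1 7 = _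
    have hloop := nextA_loop_eq bs e he hclear e 0 (bs.length + 1)
      (PySem.Int.band (bs.getD 0 0) 127) 7
      (by omega) (by omega) (fun j hj1 hj2 => h1 j (by omega) hj2)
      (pv_band127_nonneg _)
      (by have h := pv_band127_lt (bs.getD 0 0)
          have h2 : (2:Int)^7 = 128 := by norm_num
          omega)
    simp only [Nat.zero_add] at hloop
    rw [List.getD_eq_getElem bs 0 hlen] at hloop
    rw [hloop]
    have hcs : pvChunkSum bs 0 (e+1) = pvChunk (bs.getD 0 0) + 2^7 * pvChunkSum bs 1 e := rfl
    rw [hcs, List.getD_eq_getElem bs 0 hlen]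
    simp only [pvChunk]
    congr 1
    ring
  have hB : next_size_delta_alt bs = (pvChunkSum bs 0 (e+1), bs.drop (e+1)) := by
    unfold next_size_delta_alt
    have hfe : findEnd bs bs.length 1 = e + 1 := by
      have := findEnd_eq bs e he hclear e 0 bs.length (by omega) (by omega)
        (fun j hj1 hj2 => h1 j (by omega) hj2)
      simpa using this
    rw [hfe]
    simp only
    rw [sumB_eq bs (e+1), PySem.List.slice_from_natCast]
  rw [hA, hB]
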